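-- pv_equiv track=rewrite | github.com/lbl-srg/BuildingsPy | buildingspy/development/regressiontest.py | are_statistics_equal
-- ===== SOURCE A (Python) =====
-- def are_statistics_equal(s1, s2):
--     """ Compare the simulation statistics `s1` and `s2` and
--         return `True` if they are equal, or `False` otherwise.
--
--     """
--     x = s1.strip()
--     y = s2.strip()
--     if x == y:
--         return True
--     # If they have a comma, such as from 1, 20, 1, 14, then split it,
--     # sort it, and compare the entries for equality
--
--     def g(s): return s.replace(" ", "").split(",")
--     # Sort and remove 0, as we are not interested in these equations because
--     # they are solved explicitely
--     sp1 = [x for x in sorted(g(x)) if x != '0']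
--     sp2 = [x for x in sorted(g(y)) if x != '0']
--     # If the list have different lengths, they are not equal
--     if len(sp1) != len(sp2):
--         return False
--     # They are of equal lengths, compare each element
--     for i in range(len(sp1)):
--         if sp1[i] != sp2[i]:
--             return False
--
--     return True
-- ===== SOURCE B (Python) =====
-- def _token_counts(s):
--     """Frequency table of the comma-separated tokens of s (spaces removed),
--     ignoring '0' tokens."""
--     counts = {}
--     for t in s.replace(" ", "").split(","):
--         if t != '0':
--             counts[t] = counts.get(t, 0) + 1
--     return counts
--
--
-- def are_statistics_equal(s1, s2):
--     """ Compare the simulation statistics `s1` and `s2` and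
--         return `True` if they are equal, or `False` otherwise.
--
--     """
--     x = s1.strip()
--     y = s2.strip()
--     if x == y:
--         return True
--     # Multiset comparison by frequency table instead of sort + lockstep scan.
--     return _token_counts(x) == _token_counts(y)
-- ===== Notes on version B (the rewrite author's own statement) =====
-- stated objective: faster
-- what changed: Replaces sort + length check + element-wise index loop by a single-pass frequency table (dict of token counts, '0' skipped while counting) compared as mappings.
import Mathlib
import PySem

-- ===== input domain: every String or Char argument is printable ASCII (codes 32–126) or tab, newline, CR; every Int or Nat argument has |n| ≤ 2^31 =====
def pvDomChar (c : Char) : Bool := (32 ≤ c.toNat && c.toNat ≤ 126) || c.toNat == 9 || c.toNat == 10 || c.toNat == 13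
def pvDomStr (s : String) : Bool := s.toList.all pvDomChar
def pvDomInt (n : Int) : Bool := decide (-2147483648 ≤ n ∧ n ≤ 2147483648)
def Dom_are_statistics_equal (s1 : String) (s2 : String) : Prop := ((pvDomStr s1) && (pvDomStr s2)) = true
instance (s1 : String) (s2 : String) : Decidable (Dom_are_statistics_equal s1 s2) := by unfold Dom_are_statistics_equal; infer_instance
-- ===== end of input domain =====

-- B replaces A's sort + length check + element-wise loop by a one-pass token
-- frequency table compared as a mapping (objective: faster, O(n) vs O(n log n)).


-- normalizer g(s) = s.replace(" ", "").split(",") — identical helper in both Pythons.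
-- split? is none only for sep = ""; the separator here is ",", so getD never fires.
def pvTokens (s : String) : List String :=
  (PySem.Str.split? (PySem.Str.replace s " " "") ",").getD []

-- ===== PORT A =====
def are_statistics_equal (s1 : String) (s2 : String) : Bool :=
  let x := PySem.Str.strip s1
  let y := PySem.Str.strip s2
  if x == y then true
  else
    let sp1 := (PySem.List.sorted (pvTokens x) (fun t => t) false).filter (fun t => t != "0")
    let sp2 := (PySem.List.sorted (pvTokens y) (fun t => t) false).filter (fun t => t != "0")
    if sp1.length != sp2.length then false
    else
      -- 'for i in range(len(sp1)): if sp1[i] != sp2[i]: return False' then 'return True'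
      (PySem.List.pyRange 0 (sp1.length : Int) 1).all
        (fun i => PySem.List.pyGetD sp1 i "" == PySem.List.pyGetD sp2 i "")

-- ===== PORT B =====
-- _token_counts: one pass over the tokens, skipping '0', counting in a dict
def pvCounts (s : String) : PySem.Dict String Int :=
  (pvTokens s).foldl
    (fun d t => if t == "0" then d else d.insert t (d.getD t 0 + 1))
    PySem.Dict.empty

def are_statistics_equal_alt (s1 : String) (s2 : String) : Bool :=
  let x := PySem.Str.strip s1
  let y := PySem.Str.strip s2
  if x == y then true
  else
    -- Python's 'dict == dict' is order-insensitive mapping equality: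
    -- same number of keys and every (k, v) of the first looked up in the second.
    let c1 := pvCounts x
    let c2 := pvCounts y
    c1.size == c2.size && c1.items.all (fun kv => c2.getD kv.1 0 == kv.2)

-- ===== PRECONDITION & SPEC =====
def Spec_are_statistics_equal (s1 : String) (s2 : String) (out : Bool) : Prop := out = are_statistics_equal_alt s1 s2
instance (s1 : String) (s2 : String) (out : Bool) : Decidable (Spec_are_statistics_equal s1 s2 out) := by unfold Spec_are_statistics_equal; infer_instance

-- ===== CLAIM (what is proved, stated in full; the proofs are below) =====
def Claim_equal_are_statistics_equal : Prop := ∀ (s1 : String) (s2 : String), Dom_are_statistics_equal s1 s2 → Spec_are_statistics_equal s1 s2 (are_statistics_equal s1 s2)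

-- ===== LEMMAS AND PROOFS =====

-- B's loop with the '0'-skip inside equals the plain counting loop over the filtered list
theorem pvCounts_eq_counter (s : String) :
    pvCounts s = PySem.Dict.counter ((pvTokens s).filter (fun t => t != "0")) := by
  rw [← PySem.Dict.foldl_insert_getD_add_one_eq_counter]
  unfold pvCounts
  generalize pvTokens s = l
  suffices h : ∀ (l : List String) (d : PySem.Dict String Int),
      l.foldl (fun d t => if t == "0" then d else d.insert t (d.getD t 0 + 1)) d
        = (l.filter (fun t => t != "0")).foldl (fun d t => d.insert t (d.getD t 0 + 1)) d from
    h l PySem.Dict.empty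
  intro l
  induction l with
  | nil => intro d; rfl
  | cons t l ih =>
    intro d
    by_cases h : t = "0"
    · have e1 : List.foldl (fun d t => if (t == "0") = true then d else d.insert t (d.getD t 0 + 1)) d (t :: l)
          = List.foldl (fun d t => if (t == "0") = true then d else d.insert t (d.getD t 0 + 1)) d l := by
        rw [List.foldl_cons]; congr 1; simp [h]
      have e2 : List.filter (fun t => t != "0") (t :: l) = List.filter (fun t => t != "0") l := by
        simp [h]
      rw [e1, e2]; exact ih d
    · have e1 : List.foldl (fun d t => if (t == "0") = true then d else d.insert t (d.getD t 0 + 1)) d (t :: l)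
          = List.foldl (fun d t => if (t == "0") = true then d else d.insert t (d.getD t 0 + 1))
              (d.insert t (d.getD t 0 + 1)) l := by
        rw [List.foldl_cons]; congr 1; simp [h]
      have e2 : List.filter (fun t => t != "0") (t :: l) = t :: List.filter (fun t => t != "0") l := by
        simp [h]
      rw [e1, e2, List.foldl_cons]; exact ih _

-- filtering a sorted list = sorting the filtered list (stable sort, identity key)
theorem filter_sorted_eq (l : List String) (p : String → Bool) :
    (PySem.List.sorted l (fun t => t) false).filter p
      = PySem.List.sorted (l.filter p) (fun t => t) false := by
  symm
  apply PySem.List.sorted_id_eq_of_perm_of_pairwise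
  · exact (PySem.List.sorted_perm l (fun t => t) false).filter p
  · exact List.Pairwise.filter p (PySem.List.sorted_pairwise l (fun t => t))

-- A's length-guarded index loop decides list equality
theorem loop_eq_true_iff (l1 l2 : List String) (h : l1.length = l2.length) :
    ((PySem.List.pyRange 0 (l1.length : Int) 1).all
      (fun i => PySem.List.pyGetD l1 i "" == PySem.List.pyGetD l2 i "")) = true ↔ l1 = l2 := by
  rw [PySem.List.pyRange_zero_nat, List.all_map]
  constructor
  · intro hall
    apply List.ext_getElem h
    intro i h1 h2
    have hi := List.all_eq_true.mp hall i (List.mem_range.mpr h1)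
    simp only [Function.comp, PySem.List.pyGetD_natCast, beq_iff_eq] at hi
    rwa [List.getD_eq_getElem _ _ h1, List.getD_eq_getElem _ _ h2] at hi
  · rintro rfl
    simp

-- B's mapping-equality check decides multiset equality of the token lists
theorem counter_check_iff (f1 f2 : List String) :
    (((PySem.Dict.counter f1).size == (PySem.Dict.counter f2).size
      && (PySem.Dict.counter f1).items.all
           (fun kv => (PySem.Dict.counter f2).getD kv.1 0 == kv.2)) = true)
    ↔ f1.Perm f2 := by
  rw [Bool.and_eq_true, beq_iff_eq]
  have hsize : ∀ g : List String, (PySem.Dict.counter g).size = (PySem.Set.ofList g).length := by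
    intro g
    show (PySem.Dict.counter g).items.length = _
    rw [PySem.Dict.items_counter, List.length_map]
  constructor
  · rintro ⟨hlen, hall⟩
    rw [hsize, hsize] at hlen
    have hcnt : ∀ k ∈ PySem.Set.ofList f1, List.count k f2 = List.count k f1 := by
      intro k hk
      have := List.all_eq_true.mp hall (k, (List.count k f1 : Int))
        (by rw [PySem.Dict.items_counter]; exact List.mem_map.mpr ⟨k, hk, rfl⟩)
      simp only [PySem.Dict.getD_counter, beq_iff_eq, Int.natCast_inj] at this
      exact this
    have hsub : PySem.Set.ofList f1 ⊆ PySem.Set.ofList f2 := by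
      intro k hk
      rw [PySem.Set.mem_ofList]
      have h1 : 0 < List.count k f1 := List.count_pos_iff.mpr ((PySem.Set.mem_ofList f1 k).mp hk)
      exact List.count_pos_iff.mp (hcnt k hk ▸ h1)
    have hperm : (PySem.Set.ofList f1).Perm (PySem.Set.ofList f2) :=
      (List.subperm_of_subset (PySem.Set.nodup_ofList f1) hsub).perm_of_length_le (le_of_eq hlen.symm)
    rw [List.perm_iff_count]
    intro k
    by_cases hk : k ∈ f1
    · exact (hcnt k ((PySem.Set.mem_ofList f1 k).mpr hk)).symm
    · have hk2 : k ∉ f2 := by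
        intro hk2
        exact hk ((PySem.Set.mem_ofList f1 k).mp
          (hperm.mem_iff.mpr ((PySem.Set.mem_ofList f2 k).mpr hk2)))
      rw [List.count_eq_zero_of_not_mem hk, List.count_eq_zero_of_not_mem hk2]
  · intro hp
    refine ⟨?_, ?_⟩
    · rw [hsize, hsize]
      exact ((List.perm_ext_iff_of_nodup (PySem.Set.nodup_ofList f1) (PySem.Set.nodup_ofList f2)).mpr
        (fun a => by rw [PySem.Set.mem_ofList, PySem.Set.mem_ofList]; exact hp.mem_iff)).length_eq
    · apply List.all_eq_true.mpr
      intro kv hkv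
      rw [PySem.Dict.items_counter] at hkv
      obtain ⟨k', hk'mem, hk'⟩ := List.mem_map.mp hkv
      subst hk'
      simp [PySem.Dict.getD_counter, hp.count_eq]

-- the whole x ≠ y branch: A's sort-and-scan equals B's counter comparison
theorem branch_eq (t1 t2 : List String) :
    (let sp1 := (PySem.List.sorted t1 (fun t => t) false).filter (fun t => t != "0")
     let sp2 := (PySem.List.sorted t2 (fun t => t) false).filter (fun t => t != "0")
     if sp1.length != sp2.length then false
     else (PySem.List.pyRange 0 (sp1.length : Int) 1).all
        (fun i => PySem.List.pyGetD sp1 i "" == PySem.List.pyGetD sp2 i ""))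
    = ((PySem.Dict.counter (t1.filter (fun t => t != "0"))).size
        == (PySem.Dict.counter (t2.filter (fun t => t != "0"))).size
      && (PySem.Dict.counter (t1.filter (fun t => t != "0"))).items.all
           (fun kv => (PySem.Dict.counter (t2.filter (fun t => t != "0"))).getD kv.1 0 == kv.2)) := by
  rw [Bool.eq_iff_iff]
  rw [counter_check_iff]
  rw [← PySem.List.sorted_id_eq_sorted_id_iff_perm]
  rw [← filter_sorted_eq t1, ← filter_sorted_eq t2]
  set sp1 := (PySem.List.sorted t1 (fun t => t) false).filter (fun t => t != "0") with hsp1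
  set sp2 := (PySem.List.sorted t2 (fun t => t) false).filter (fun t => t != "0") with hsp2
  by_cases hlen : sp1.length = sp2.length
  · rw [if_neg (by simp [hlen] : ¬ (sp1.length != sp2.length) = true)]
    exact loop_eq_true_iff sp1 sp2 hlen
  · have hne : sp1 ≠ sp2 := fun h => hlen (h ▸ rfl)
    simp only [if_pos (bne_iff_ne.mpr hlen)]
    simp [hne]

-- ===== VERDICT (by name: the statement is the Claim_ definition above) =====
theorem are_statistics_equal_spec : Claim_equal_are_statistics_equal := by
  intro s1 s2 _
  unfold Spec_are_statistics_equal are_statistics_equal are_statistics_equal_alt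
  by_cases hxy : PySem.Str.strip s1 == PySem.Str.strip s2
  · simp [hxy]
  · simp only [Bool.not_eq_true] at hxy
    simp only [hxy, if_false, Bool.false_eq_true]
    rw [pvCounts_eq_counter, pvCounts_eq_counter]
    exact branch_eq (pvTokens (PySem.Str.strip s1)) (pvTokens (PySem.Str.strip s2))
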